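-- pv_equiv track=rewrite | github.com/nirakshi2003/Daily_DSA_Codeate | Day5/remove_duplicate_element.py | remove_duplicate_element
-- ===== SOURCE A (Python) =====
-- def remove_duplicate_element(arr):
--     n=len(arr)
--     if n==0:
--         return 0
--     i=0
--     for j in range(1, n):
--         if arr[j]!=arr[i]:
--             i+=1
--             arr[i]=arr[j]
--     return i+1
-- ===== SOURCE B (Python) =====
-- def remove_duplicate_element(arr):
--     if not arr:
--         return 0
--     uniq = [arr[0]]
--     for x in arr[1:]:
--         if x != uniq[-1]:
--             uniq.append(x)
--     arr[:len(uniq)] = uniq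
--     return len(uniq)
-- ===== Notes on version B (the rewrite author's own statement) =====
-- stated objective: simpler
-- what changed: Replaces the in-place two-pointer overwrite driven by index arithmetic with a build-then-writeback pass: collect the kept values in a list by comparing each element with the last kept one, then copy them into the front and return the list's length.
import Mathlib
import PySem

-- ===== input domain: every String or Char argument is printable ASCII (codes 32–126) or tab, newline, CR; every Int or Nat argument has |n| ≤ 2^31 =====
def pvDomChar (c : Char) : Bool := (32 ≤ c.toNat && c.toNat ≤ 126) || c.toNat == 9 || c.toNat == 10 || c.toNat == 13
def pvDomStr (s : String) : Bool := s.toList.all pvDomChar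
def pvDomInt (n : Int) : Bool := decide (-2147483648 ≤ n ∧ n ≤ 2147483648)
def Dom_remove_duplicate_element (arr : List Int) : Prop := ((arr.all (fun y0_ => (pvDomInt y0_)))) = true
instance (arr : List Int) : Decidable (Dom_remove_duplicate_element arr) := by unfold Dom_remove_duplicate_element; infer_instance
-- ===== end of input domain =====

-- B replaces A's in-place two-pointer overwrite with a build-then-writeback pass (simpler);
-- both mutate arr's front identically in Python, and the equivalence proved here is about the return value.

-- ===== PORT A =====
-- A's state: the write pointer i and the (mutated) array; loop over j in range(1, n).
def remove_duplicate_element (arr : List Int) : Int :=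
  let n : Int := arr.length
  if n = 0 then 0
  else
    let st := (PySem.List.pyRange 1 n 1).foldl
      (fun (st : Int × List Int) j =>
        if PySem.List.pyGetD st.2 j 0 ≠ PySem.List.pyGetD st.2 st.1 0 then
          (st.1 + 1, PySem.List.pySetD st.2 (st.1 + 1) (PySem.List.pyGetD st.2 j 0))
        else st)
      (0, arr)
    st.1 + 1

-- ===== PORT B =====
-- uniq starts as [arr[0]]; each x of arr[1:] is appended when it differs from uniq[-1].
def remove_duplicate_element_alt (arr : List Int) : Int :=
  match arr with
  | [] => 0
  | h :: _ =>
    let uniq := (PySem.List.slice arr (some 1) none).foldl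
      (fun uniq x => if x ≠ PySem.List.pyGetD uniq (-1) 0 then uniq ++ [x] else uniq)
      [h]
    (uniq.length : Int)

-- ===== PRECONDITION & SPEC =====
def Spec_remove_duplicate_element (arr : List Int) (out : Int) : Prop := out = remove_duplicate_element_alt arr
instance (arr : List Int) (out : Int) : Decidable (Spec_remove_duplicate_element arr out) := by unfold Spec_remove_duplicate_element; infer_instance

-- ===== CLAIM (what is proved, stated in full; the proofs are below) =====
def Claim_equal_remove_duplicate_element : Prop := ∀ (arr : List Int), Dom_remove_duplicate_element arr → Spec_remove_duplicate_element arr (remove_duplicate_element arr)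

-- ===== LEMMAS AND PROOFS =====

-- Loop invariant: at A-index j with write pointer i and mutated array a, while B holds uniq:
-- a[i] is uniq's last kept value, the unprocessed suffix of a is still t, and i+1 = |uniq|.
theorem rde_loop (t : List Int) : ∀ (j i : Nat) (a uniq : List Int),
    i < j →
    a.length = j + t.length →
    a[i]? = some (PySem.List.pyGetD uniq (-1) 0) →
    (∀ k : Nat, k < t.length → a[j + k]? = t[k]?) →
    ((i : Int) + 1 = uniq.length) →
    ((PySem.List.pyRange (j : Int) ((j : Int) + t.length) 1).foldl
      (fun (st : Int × List Int) x =>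
        if PySem.List.pyGetD st.2 x 0 ≠ PySem.List.pyGetD st.2 st.1 0 then
          (st.1 + 1, PySem.List.pySetD st.2 (st.1 + 1) (PySem.List.pyGetD st.2 x 0))
        else st)
      ((i : Int), a)).1 + 1
    = ((t.foldl (fun uniq x => if x ≠ PySem.List.pyGetD uniq (-1) 0 then uniq ++ [x] else uniq) uniq).length : Int) := by
  induction t with
  | nil =>
    intro j i a uniq _ _ _ _ hlen
    simp only [List.length_nil, Nat.cast_zero, add_zero,
      PySem.List.pyRange_one_eq_nil (le_refl ((j : Int))), List.foldl_nil]
    exact hlen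
  | cons x t ih =>
    intro j i a uniq hij hlenA hai hsuf hlen
    have hjlt : (j : Int) < (j : Int) + (x :: t).length := by
      push_cast [List.length_cons]; omega
    rw [PySem.List.pyRange_one_cons hjlt]
    simp only [List.foldl_cons]
    have e1 : ((j : Int) + 1) = ((j + 1 : Nat) : Int) := by push_cast; ring
    have e2 : ((j : Int) + ((x :: t).length : Int)) = ((j + 1 : Nat) : Int) + (t.length : Int) := by
      push_cast [List.length_cons]; ring
    rw [e1, e2]
    have haj : a[j]? = some x := by
      have := hsuf 0 (by simp)
      simpa using this
    have hjlena : j < a.length := by simp [List.length_cons] at hlenA; omega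
    have hilena : i < a.length := by omega
    have hgj : PySem.List.pyGetD a (j : Int) 0 = x := by
      rw [PySem.List.pyGetD_natCast]
      simpa [List.getD] using congrArg (fun o => o.getD 0) haj
    have hgi : PySem.List.pyGetD a (i : Int) 0 = PySem.List.pyGetD uniq (-1) 0 := by
      rw [PySem.List.pyGetD_natCast]
      simpa [List.getD] using congrArg (fun o => o.getD 0) hai
    rw [hgj, hgi]
    have hshift : ∀ k : Nat, k < t.length → a[(j + 1) + k]? = t[k]? := by
      intro k hk
      have h2 := hsuf (k + 1) (by simp; omega)
      rw [show j + 1 + k = j + (k + 1) from by omega]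
      simpa using h2
    by_cases hx : x = PySem.List.pyGetD uniq (-1) 0
    · -- duplicate: both states unchanged
      rw [if_neg (by simp [hx]), if_neg (by simp [hx])]
      exact ih (j + 1) i a uniq (by omega)
        (by simp [List.length_cons] at hlenA ⊢; omega) hai hshift hlen
    · -- new value: A writes x at position i+1, B appends x to uniq
      rw [if_pos hx, if_pos hx]
      have hi1 : ((i : Int) + 1) = ((i + 1 : Nat) : Int) := by push_cast; ring
      rw [hi1, PySem.List.pySetD_natCast]
      have hi1len : i + 1 < a.length := by omega
      exact ih (j + 1) (i + 1) (a.set (i + 1) x) (uniq ++ [x]) (by omega)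
        (by simp [List.length_cons] at hlenA ⊢; omega)
        (by
          rw [PySem.List.pyGetD_neg_one_append_singleton,
              List.getElem?_set_self hi1len])
        (fun k hk => by
          rw [List.getElem?_set_ne (by omega)]
          exact hshift k hk)
        (by simp only [List.length_append, List.length_cons, List.length_nil]; omega)

-- ===== VERDICT (by name: the statement is the Claim_ definition above) =====
theorem remove_duplicate_element_spec : Claim_equal_remove_duplicate_element := by
  intro arr _
  unfold Spec_remove_duplicate_element remove_duplicate_element remove_duplicate_element_alt
  cases arr with
  | nil => simp
  | cons h t =>
    simp only [List.length_cons]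
    rw [if_neg (by push_cast; omega)]
    have hslice : PySem.List.slice (h :: t) (some 1) none = t := by
      rw [PySem.List.slice_some_none]
      simp [PySem.List.clampIdx]
    rw [hslice]
    have hinit : (h :: t)[0]? = some (PySem.List.pyGetD [h] (-1) 0) := rfl
    have := rde_loop t 1 0 (h :: t) [h] (by omega)
      (by simp only [List.length_cons]; omega)
      hinit (fun k hk => by simp [Nat.add_comm 1 k]) (by simp)
    rw [show ((t.length + 1 : Nat) : Int) = ((1 : Nat) : Int) + (t.length : Int) from by push_cast; ring]
    exact this
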